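-- pv_equiv track=rewrite | github.com/tuandq-cs/coding-pratice | leetcode/multiply-strings.py | get_str_from_stack
-- ===== SOURCE A (Python) =====
-- def get_str_from_stack(s):
--     result = ""
--     is_all_zero = True
--     for i in range(len(s)-1, -1, -1):
--         if is_all_zero:
--             is_all_zero = s[i] == 0
--         if not is_all_zero:
--             result += f'{s[i]}'
--     return "0" if is_all_zero else result
-- ===== SOURCE B (Python) =====
-- def get_str_from_stack(s):
--     # Two-phase decomposition: reverse, trim leading zeros, then join.
--     rev = s[::-1]
--     while rev and rev[0] == 0:
--         rev = rev[1:]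
--     if not rev:
--         return "0"
--     return ''.join(str(d) for d in rev)
-- ===== Notes on version B (the rewrite author's own statement) =====
-- stated objective: simpler
-- what changed: A's single flag-driven index loop that conditionally accumulates a string is replaced by a two-phase decomposition: reverse the list, trim the zero prefix, then join all remaining digits in one go.
import Mathlib
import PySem

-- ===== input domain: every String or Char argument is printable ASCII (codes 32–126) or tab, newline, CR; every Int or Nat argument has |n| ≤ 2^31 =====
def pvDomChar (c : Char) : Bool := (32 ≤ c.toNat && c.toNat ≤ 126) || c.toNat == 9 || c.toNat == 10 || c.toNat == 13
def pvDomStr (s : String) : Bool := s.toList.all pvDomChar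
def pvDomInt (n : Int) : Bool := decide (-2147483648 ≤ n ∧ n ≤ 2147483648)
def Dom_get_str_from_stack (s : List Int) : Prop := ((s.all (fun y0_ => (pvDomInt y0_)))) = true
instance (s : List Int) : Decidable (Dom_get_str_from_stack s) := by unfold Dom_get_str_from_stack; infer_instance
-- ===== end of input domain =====

-- B replaces A's flag-driven conditional-accumulation loop with a two-phase decomposition
-- (reverse, trim the zero prefix, join); objective: simpler, same O(n) cost.


-- ===== PORT A =====
-- the string `result` is carried as a List Char (PySem's Chars convention); `f'{s[i]}'` is PySem.Int.toChars
def get_str_from_stack (s : List Int) : String :=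
  let r := (PySem.List.pyRange (PySem.List.len s - 1) (-1) (-1)).foldl
    (fun (st : List Char × Bool) (i : Int) =>
      let is_all_zero := if st.2 then PySem.List.pyGetD s i 0 == 0 else st.2
      if !is_all_zero then (st.1 ++ PySem.Int.toChars (PySem.List.pyGetD s i 0), is_all_zero)
      else (st.1, is_all_zero))
    ([], true)
  if r.2 then "0" else String.ofList r.1

-- ===== PORT B =====
-- the `while rev and rev[0] == 0: rev = rev[1:]` loop of Source B
def pvTrimZeros : List Int → List Int
  | [] => []
  | x :: xs => if x == 0 then pvTrimZeros xs else x :: xs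

def get_str_from_stack_alt (s : List Int) : String :=
  let rev := pvTrimZeros s.reverse
  if rev.isEmpty then "0" else PySem.Str.join "" (rev.map PySem.Int.toStr)

-- ===== PRECONDITION & SPEC =====
def Spec_get_str_from_stack (s : List Int) (out : String) : Prop := out = get_str_from_stack_alt s
instance (s : List Int) (out : String) : Decidable (Spec_get_str_from_stack s out) := by unfold Spec_get_str_from_stack; infer_instance

-- ===== CLAIM (what is proved, stated in full; the proofs are below) =====
def Claim_equal_get_str_from_stack : Prop := ∀ (s : List Int), Dom_get_str_from_stack s → Spec_get_str_from_stack s (get_str_from_stack s)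

-- ===== LEMMAS AND PROOFS =====

-- A's loop step, expressed on the visited element
def pvStep (st : List Char × Bool) (x : Int) : List Char × Bool :=
  let is_all_zero := if st.2 then x == 0 else st.2
  if !is_all_zero then (st.1 ++ PySem.Int.toChars x, is_all_zero)
  else (st.1, is_all_zero)

theorem pvLoop_false (l : List Int) (acc : List Char) :
    l.foldl pvStep (acc, false) = (acc ++ (l.map PySem.Int.toChars).flatten, false) := by
  induction l generalizing acc with
  | nil => simp
  | cons x xs ih => simp [pvStep, ih]

theorem pvLoop_true (l : List Int) (acc : List Char) :
    l.foldl pvStep (acc, true) =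
      (if pvTrimZeros l = [] then (acc, true)
       else (acc ++ ((pvTrimZeros l).map PySem.Int.toChars).flatten, false)) := by
  induction l generalizing acc with
  | nil => simp [pvTrimZeros]
  | cons x xs ih =>
    by_cases hx : x = 0
    · subst hx
      simp [pvTrimZeros, pvStep, ih]
    · have hb : (x == 0) = false := by simp [hx]
      simp [pvTrimZeros, pvStep, hb, pvLoop_false]

theorem pvJoin_nil_eq_flatten : ∀ ps : List (List Char), PySem.Chars.join [] ps = ps.flatten
  | [] => by simp [PySem.Chars.join_nil]
  | [p] => by simp [PySem.Chars.join_singleton]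
  | p :: q :: rest => by
      rw [PySem.Chars.join_cons_cons, pvJoin_nil_eq_flatten (q :: rest)]
      simp

theorem pvA_eq_fold (s : List Int) :
    get_str_from_stack s =
      (let r := s.reverse.foldl pvStep ([], true)
       if r.2 then "0" else String.ofList r.1) := by
  unfold get_str_from_stack
  have h1 : PySem.List.pyRange (PySem.List.len s - 1) (-1) (-1)
      = (PySem.List.pyRange 0 (PySem.List.len s)).reverse := by
    rw [PySem.List.pyRange_neg_one_eq_reverse]
    norm_num
  rw [h1]
  have h2 : ((PySem.List.pyRange 0 (PySem.List.len s)).reverse.map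
      (fun j => PySem.List.pyGetD s j 0)) = s.reverse := by
    rw [List.map_reverse, PySem.List.map_pyGetD_pyRange_zero]
  have h3 : List.foldl (fun (st : List Char × Bool) (i : Int) =>
      let is_all_zero := if st.2 then PySem.List.pyGetD s i 0 == 0 else st.2
      if !is_all_zero then (st.1 ++ PySem.Int.toChars (PySem.List.pyGetD s i 0), is_all_zero)
      else (st.1, is_all_zero)) ([], true) (PySem.List.pyRange 0 (PySem.List.len s)).reverse
      = List.foldl pvStep ([], true) s.reverse := by
    rw [← h2, List.foldl_map]
    rfl
  rw [h3]

-- ===== VERDICT (by name: the statement is the Claim_ definition above) =====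
theorem get_str_from_stack_spec : Claim_equal_get_str_from_stack := by
  intro s _
  unfold Spec_get_str_from_stack get_str_from_stack_alt
  rw [pvA_eq_fold]
  simp only [pvLoop_true s.reverse []]
  by_cases h : pvTrimZeros s.reverse = []
  · simp [h]
  · simp only [h, List.isEmpty_iff, if_false]
    apply String.toList_inj.mp
    rw [PySem.Str.toList_join]
    simp [pvJoin_nil_eq_flatten, Function.comp_def, PySem.Int.toList_toStr]
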